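-- pv_equiv track=rewrite | github.com/bcamastro/Python-Algo-Practice-1 | arrays_to_do_1.py | skyline_heights
-- ===== SOURCE A (Python) =====
-- def skyline_heights(building_heights):
--     max_building_height=0
--     visible_buildings=[]
--     for building_height in building_heights:
--         if building_height>max_building_height:
--             visible_buildings.append(building_height)
--             max_building_height=building_height
--     return visible_buildings
-- ===== SOURCE B (Python) =====
-- def skyline_heights(building_heights):
--     # Two-pass: build a prefix-maximum table seeded with 0, then filter by
--     # comparing consecutive prefix maxima.
--     prefix_max = [0]
--     for h in building_heights:
--         prefix_max.append(max(prefix_max[-1], h))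
--     return [h for a, b, h in zip(prefix_max, prefix_max[1:], building_heights) if b > a]
-- ===== Notes on version B (the rewrite author's own statement) =====
-- stated objective: alternative
-- what changed: Replaces the single intertwined running-max loop with a two-pass decomposition: first build a prefix-maximum table seeded by 0, then filter heights where consecutive prefix maxima strictly increase.
import Mathlib
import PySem

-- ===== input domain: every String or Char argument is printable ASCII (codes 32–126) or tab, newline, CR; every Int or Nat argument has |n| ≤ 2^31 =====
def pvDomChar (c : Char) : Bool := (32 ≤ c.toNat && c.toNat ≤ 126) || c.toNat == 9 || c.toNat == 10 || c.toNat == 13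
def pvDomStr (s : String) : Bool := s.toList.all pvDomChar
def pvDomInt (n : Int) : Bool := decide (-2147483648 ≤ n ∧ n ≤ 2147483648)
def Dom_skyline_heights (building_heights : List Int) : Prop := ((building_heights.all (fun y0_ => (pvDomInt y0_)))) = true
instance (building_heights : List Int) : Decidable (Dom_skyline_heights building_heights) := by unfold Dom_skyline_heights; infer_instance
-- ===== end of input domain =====

-- B replaces A's single running-max loop by a two-pass decomposition (prefix-max table, then consecutive-comparison filter); same O(n) cost.


-- ===== PORT A =====
-- A: one fold over the list carrying (max_building_height, visible_buildings).
def skyline_heights (building_heights : List Int) : List Int :=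
  (building_heights.foldl
    (fun (st : Int × List Int) building_height =>
      if building_height > st.1 then (building_height, st.2 ++ [building_height]) else st)
    (0, [])).2

-- ===== PORT B =====
-- B pass 1: build the prefix-maximum table seeded with 0 (prefix_max[-1] = getLastD 0).
def pvPrefixMax (building_heights : List Int) : List Int :=
  building_heights.foldl (fun pm h => pm ++ [max (pm.getLastD 0) h]) [0]

-- B pass 2: zip(prefix_max, prefix_max[1:], building_heights), keep h when b > a.
def skyline_heights_alt (building_heights : List Int) : List Int :=
  let pm := pvPrefixMax building_heights
  ((pm.zip (pm.drop 1)).zip building_heights).filterMap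
    (fun x => if x.1.2 > x.1.1 then some x.2 else none)

-- ===== PRECONDITION & SPEC =====
def Spec_skyline_heights (building_heights : List Int) (out : List Int) : Prop := out = skyline_heights_alt building_heights
instance (building_heights : List Int) (out : List Int) : Decidable (Spec_skyline_heights building_heights out) := by unfold Spec_skyline_heights; infer_instance

-- ===== CLAIM (what is proved, stated in full; the proofs are below) =====
def Claim_equal_skyline_heights : Prop := ∀ (building_heights : List Int), Dom_skyline_heights building_heights → Spec_skyline_heights building_heights (skyline_heights building_heights)

-- ===== LEMMAS AND PROOFS =====

-- Reference recursion: the visible buildings given current running max m.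
def pvSky (m : Int) : List Int → List Int
  | [] => []
  | h :: t => if h > m then h :: pvSky h t else pvSky m t

-- Reference prefix-max scan: pvScan m bs always starts with m.
def pvScan (m : Int) : List Int → List Int
  | [] => [m]
  | h :: t => m :: pvScan (max m h) t

theorem pvSky_foldA (bs : List Int) : ∀ (m : Int) (acc : List Int),
    (bs.foldl
      (fun (st : Int × List Int) h => if h > st.1 then (h, st.2 ++ [h]) else st)
      (m, acc)).2 = acc ++ pvSky m bs := by
  induction bs with
  | nil => intro m acc; simp [pvSky]
  | cons h t ih =>
    intro m acc
    by_cases hc : h > m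
    · simp [pvSky, hc, List.foldl_cons, ih]
    · simp [pvSky, hc, List.foldl_cons, ih]

theorem pvScan_cons (m : Int) (bs : List Int) : ∃ tl, pvScan m bs = m :: tl := by
  cases bs <;> exact ⟨_, rfl⟩

theorem pvPrefixMax_scan (bs : List Int) : ∀ (m : Int) (p : List Int),
    (bs.foldl (fun pm h => pm ++ [max (pm.getLastD 0) h]) (p ++ [m])) = p ++ pvScan m bs := by
  induction bs with
  | nil => intro m p; simp [pvScan]
  | cons h t ih =>
    intro m p
    have hl : (p ++ [m]).getLastD 0 = m := by simp
    calc ((h :: t).foldl (fun pm h => pm ++ [max (pm.getLastD 0) h]) (p ++ [m]))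
        = t.foldl (fun pm h => pm ++ [max (pm.getLastD 0) h]) ((p ++ [m]) ++ [max m h]) := by
          simp only [List.foldl_cons, hl]
      _ = (p ++ [m]) ++ pvScan (max m h) t := ih (max m h) (p ++ [m])
      _ = p ++ pvScan m (h :: t) := by simp [pvScan]

theorem pvFilt_scan (bs : List Int) : ∀ (m : Int),
    (((pvScan m bs).zip ((pvScan m bs).drop 1)).zip bs).filterMap
      (fun x => if x.1.2 > x.1.1 then some x.2 else none) = pvSky m bs := by
  induction bs with
  | nil => intro m; simp [pvScan, pvSky]
  | cons h t ih =>
    intro m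
    obtain ⟨tl, htl⟩ := pvScan_cons (max m h) t
    have key : (((pvScan m (h :: t)).zip ((pvScan m (h :: t)).drop 1)).zip (h :: t))
        = ((m, max m h), h) ::
            (((pvScan (max m h) t).zip ((pvScan (max m h) t).drop 1)).zip t) := by
      show (((m :: pvScan (max m h) t).zip ((m :: pvScan (max m h) t).drop 1)).zip (h :: t)) = _
      rw [htl]
      rfl
    rw [key, List.filterMap_cons, ih]
    by_cases hc : h > m
    · have hm : max m h = h := by omega
      simp [pvSky, hc, hm]
    · have hm : max m h = m := by omega
      simp [pvSky, hc, hm]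

-- ===== VERDICT (by name: the statement is the Claim_ definition above) =====
theorem skyline_heights_spec : Claim_equal_skyline_heights := by
  intro bs _
  show skyline_heights bs = skyline_heights_alt bs
  have hpm : pvPrefixMax bs = pvScan 0 bs := by
    have := pvPrefixMax_scan bs 0 []
    simpa [pvPrefixMax] using this
  simp only [skyline_heights, skyline_heights_alt, hpm, pvSky_foldA bs 0 [],
    List.nil_append, pvFilt_scan]
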